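-- pv_equiv track=rewrite | github.com/SUPERNOOB20/Guias-IP | Guia7.py | eliminarRepetidosFOR
-- ===== SOURCE A (Python) =====
-- def eliminarRepetidosFOR (s:str) -> str:       # "s" es de tipo *** IN ***.
--     s_sin_rep = s
--     for caracter in s_sin_rep:
--         quitaUnaAparicion: str = s_sin_rep
--         quitaUnaAparicion = quitaUnaAparicion.replace(caracter, "", 1)
--         if caracter in quitaUnaAparicion:
--             s_sin_rep = s_sin_rep.replace(caracter, "", 1)
--     return s_sin_rep
-- ===== SOURCE B (Python) =====
-- def eliminarRepetidosFOR(s: str) -> str: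
--     # One reverse pass: keep the first occurrence seen from the right
--     # (= last occurrence in s), then restore the original order.
--     seen = set()
--     out = []
--     for c in reversed(s):
--         if c not in seen:
--             seen.add(c)
--             out.append(c)
--     return "".join(reversed(out))
-- ===== Notes on version B (the rewrite author's own statement) =====
-- stated objective: faster
-- what changed: A repeatedly rescans and rebuilds the string (replace + membership per character, quadratic); B makes one reverse pass with a seen-set keeping the first occurrence from the right, then reverses back.
import Mathlib
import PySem

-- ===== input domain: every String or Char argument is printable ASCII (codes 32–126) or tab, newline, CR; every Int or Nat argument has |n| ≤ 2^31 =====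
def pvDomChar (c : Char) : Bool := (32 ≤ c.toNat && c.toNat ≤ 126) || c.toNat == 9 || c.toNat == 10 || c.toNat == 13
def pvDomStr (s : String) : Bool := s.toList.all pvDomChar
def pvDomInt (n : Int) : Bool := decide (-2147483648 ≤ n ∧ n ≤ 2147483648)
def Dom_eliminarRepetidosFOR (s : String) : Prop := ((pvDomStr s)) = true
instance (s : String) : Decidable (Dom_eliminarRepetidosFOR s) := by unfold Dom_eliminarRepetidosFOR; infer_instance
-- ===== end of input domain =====

-- B replaces A's quadratic rescan-and-rebuild loop by one reverse pass with a seen-set (kept-last dedup); faster (asymptotic, measured).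

-- ===== PORT A =====
-- str.replace(caracter, "", 1) for a single-character pattern: removes the first
-- occurrence, exact (ported by hand; PySem.Str.replace has no count argument).
def pvReplaceOnce (cs : List Char) (c : Char) : List Char :=
  match cs with
  | [] => []
  | x :: xs => if x = c then xs else x :: pvReplaceOnce xs c

-- one iteration of A's loop body, state = s_sin_rep
def pvStepA (cur : List Char) (c : Char) : List Char :=
  let quitaUnaAparicion := pvReplaceOnce cur c
  if c ∈ quitaUnaAparicion then pvReplaceOnce cur c else cur

-- `for caracter in s_sin_rep` iterates the string object s_sin_rep names at loop
-- entry (= s); rebinding s_sin_rep inside the loop does not change the iterator.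
def eliminarRepetidosFOR (s : String) : String :=
  String.mk (s.toList.foldl pvStepA s.toList)

-- ===== PORT B =====
-- one iteration of B's loop body, state = (seen, out)
def pvStepB (acc : PySem.Set Char × List Char) (c : Char) : PySem.Set Char × List Char :=
  if PySem.Set.contains acc.1 c then acc else (PySem.Set.add acc.1 c, acc.2 ++ [c])

def eliminarRepetidosFOR_alt (s : String) : String :=
  let st := s.toList.reverse.foldl pvStepB (PySem.Set.empty, [])
  String.mk st.2.reverse

-- ===== PRECONDITION & SPEC =====
def Spec_eliminarRepetidosFOR (s : String) (out : String) : Prop := out = eliminarRepetidosFOR_alt s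
instance (s : String) (out : String) : Decidable (Spec_eliminarRepetidosFOR s out) := by unfold Spec_eliminarRepetidosFOR; infer_instance

-- ===== CLAIM (what is proved, stated in full; the proofs are below) =====
def Claim_equal_eliminarRepetidosFOR : Prop := ∀ (s : String), Dom_eliminarRepetidosFOR s → Spec_eliminarRepetidosFOR s (eliminarRepetidosFOR s)

-- ===== LEMMAS AND PROOFS =====

-- "keep-last" reference: G p r keeps the chars of p that occur neither later in p nor in r
def pvG : List Char → List Char → List Char
  | [], _ => []
  | c :: p, r => if c ∈ p ++ r then pvG p r else c :: pvG p r

theorem pv_mem_G (p r : List Char) (x : Char) : x ∈ pvG p r ↔ x ∈ p ∧ x ∉ r := by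
  induction p with
  | nil => simp [pvG]
  | cons c p ih =>
    simp only [pvG]
    split_ifs with h
    · simp only [List.mem_append] at h
      simp only [ih, List.mem_cons]
      constructor
      · rintro ⟨hx, hr⟩; exact ⟨Or.inr hx, hr⟩
      · rintro ⟨hx | hx, hr⟩
        · subst hx; exact ⟨h.resolve_right hr, hr⟩
        · exact ⟨hx, hr⟩
    · simp only [List.mem_append, not_or] at h
      simp only [List.mem_cons, ih]
      constructor
      · rintro (hx | ⟨hp, hr⟩)
        · subst hx; exact ⟨Or.inl rfl, h.2⟩
        · exact ⟨Or.inr hp, hr⟩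
      · rintro ⟨hx | hx, hr⟩
        · exact Or.inl hx
        · exact Or.inr ⟨hx, hr⟩

theorem pv_replaceOnce_append (a b : List Char) (c : Char) (h : c ∉ a) :
    pvReplaceOnce (a ++ c :: b) c = a ++ b := by
  induction a with
  | nil => simp [pvReplaceOnce]
  | cons x a ih =>
    simp only [List.mem_cons, not_or] at h
    simp [pvReplaceOnce, Ne.symm h.1, ih h.2]

theorem pv_G_snoc (p r : List Char) (c : Char) :
    pvG (p ++ [c]) r = pvG p (c :: r) ++ (if c ∈ r then [] else [c]) := by
  induction p with
  | nil => by_cases h : c ∈ r <;> simp [pvG, h]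
  | cons d p ih =>
    have hmem : (d ∈ (p ++ [c]) ++ r) ↔ (d ∈ p ++ c :: r) := by
      simp [List.mem_append, or_assoc]
    simp only [List.cons_append, pvG, ih]
    split_ifs with h1 h2 h2 <;> simp_all

theorem pv_L1 (r : List Char) : ∀ p, List.foldl pvStepA (pvG p r ++ r) r = pvG (p ++ r) [] := by
  induction r with
  | nil => intro p; simp [List.foldl]
  | cons c r' ih =>
    intro p
    have hc : c ∉ pvG p (c :: r') := by
      intro h
      exact ((pv_mem_G _ _ _).1 h).2 (List.mem_cons_self ..)
    have hrep : pvReplaceOnce (pvG p (c :: r') ++ c :: r') c = pvG p (c :: r') ++ r' :=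
      pv_replaceOnce_append _ _ _ hc
    have hstep : pvStepA (pvG p (c :: r') ++ c :: r') c = pvG (p ++ [c]) r' ++ r' := by
      simp only [pvStepA, hrep]
      by_cases hr : c ∈ r'
      · have : c ∈ pvG p (c :: r') ++ r' := List.mem_append.2 (Or.inr hr)
        rw [if_pos this, pv_G_snoc, if_pos hr, List.append_nil]
      · have : c ∉ pvG p (c :: r') ++ r' := by
          simp only [List.mem_append, not_or]; exact ⟨hc, hr⟩
        rw [if_neg this, pv_G_snoc, if_neg hr]
        simp
    calc List.foldl pvStepA (pvG p (c :: r') ++ c :: r') (c :: r')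
        = List.foldl pvStepA (pvG (p ++ [c]) r' ++ r') r' := by rw [List.foldl_cons, hstep]
      _ = pvG ((p ++ [c]) ++ r') [] := ih (p ++ [c])
      _ = pvG (p ++ c :: r') [] := by rw [List.append_assoc]; rfl

-- first-occurrence dedup of t relative to already-seen chars
def pvE : List Char → List Char → List Char
  | [], _ => []
  | c :: t, seen => if c ∈ seen then pvE t seen else c :: pvE t (seen ++ [c])

theorem pv_E_append (a b seen : List Char) :
    pvE (a ++ b) seen = pvE a seen ++ pvE b (seen ++ pvE a seen) := by
  induction a generalizing seen with
  | nil => simp [pvE]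
  | cons c a ih =>
    simp only [List.cons_append, pvE]
    split_ifs with h
    · exact ih seen
    · simp [ih (seen ++ [c]), List.append_assoc]

theorem pv_L3 (l : List Char) (seen : List Char) :
    pvE l.reverse seen = (pvG l seen).reverse := by
  induction l with
  | nil => simp [pvE, pvG]
  | cons c p ih =>
    have hmemG : ∀ x, x ∈ (pvG p seen).reverse ↔ x ∈ p ∧ x ∉ seen := by
      intro x; rw [List.mem_reverse]; exact pv_mem_G p seen x
    simp only [List.reverse_cons, pv_E_append, ih, pvE, pvG]
    by_cases h : c ∈ p ++ seen
    · have : c ∈ seen ++ (pvG p seen).reverse := by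
        simp only [List.mem_append] at h ⊢
        rcases h with h | h
        · by_cases hs : c ∈ seen
          · exact Or.inl hs
          · exact Or.inr ((hmemG c).2 ⟨h, hs⟩)
        · exact Or.inl h
      simp [h, this, pvE]
    · have h' : c ∉ seen ++ (pvG p seen).reverse := by
        simp only [List.mem_append, not_or] at h ⊢
        exact ⟨h.2, fun hx => h.1 ((hmemG c).1 hx).1⟩
      simp [h, h', pvE]

theorem pv_L2 (t : List Char) : ∀ (seen : PySem.Set Char) (out : List Char),
    (∀ x, x ∈ seen ↔ x ∈ out) →
    (t.foldl pvStepB (seen, out)).2 = out ++ pvE t out := by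
  induction t with
  | nil => intro seen out _; simp [pvE]
  | cons c t ih =>
    intro seen out hinv
    by_cases h : c ∈ out
    · have hcon : PySem.Set.contains seen c = true := by
        simp [PySem.Set.contains, List.contains_iff_mem, (hinv c).2 h]
      simp only [List.foldl_cons, pvStepB, hcon, if_pos]
      rw [ih seen out hinv]
      simp [pvE, h]
    · have hcon : PySem.Set.contains seen c = false := by
        simp only [PySem.Set.contains]
        simp [List.contains_iff_mem]
        intro hx
        exact h ((hinv c).1 hx)
      simp only [List.foldl_cons, pvStepB, hcon, Bool.false_eq_true, if_neg, not_false_iff]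
      have hinv' : ∀ x, x ∈ PySem.Set.add seen c ↔ x ∈ out ++ [c] := by
        intro x
        rw [PySem.Set.mem_add, List.mem_append, hinv x]
        simp
      rw [ih _ _ hinv']
      simp [pvE, h, List.append_assoc]

theorem pv_A_eq (s : String) : eliminarRepetidosFOR s = String.mk (pvG s.toList []) := by
  have := pv_L1 s.toList []
  simp only [pvG, List.nil_append, List.append_nil] at this
  simp [eliminarRepetidosFOR, this]

theorem pv_B_eq (s : String) : eliminarRepetidosFOR_alt s = String.mk (pvG s.toList []) := by
  have h2 := pv_L2 s.toList.reverse (PySem.Set.empty) [] (by simp [PySem.Set.empty])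
  simp only [eliminarRepetidosFOR_alt, h2, List.nil_append, pv_L3 s.toList []]
  simp

-- ===== VERDICT (by name: the statement is the Claim_ definition above) =====
theorem eliminarRepetidosFOR_spec : Claim_equal_eliminarRepetidosFOR := by
  intro s _
  unfold Spec_eliminarRepetidosFOR
  rw [pv_A_eq, pv_B_eq]
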